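-- pv_equiv track=rewrite | github.com/Kumarvels/OpenTrustEval | data_engineering/dataset_integration.py | _type_matches
-- ===== SOURCE A (Python) =====
-- def _type_matches(expected: str, actual: str) -> bool:
--     """Check if actual type matches expected type"""
--     type_mapping = {
--         'int64': ['int64', 'int32', 'int'],
--         'float64': ['float64', 'float32', 'float'],
--         'string': ['object', 'string'],
--         'bool': ['bool', 'boolean']
--     }
--
--     for expected_type, actual_types in type_mapping.items():
--         if expected in actual_types:
--             return actual in actual_types
--     return expected == actual
-- ===== SOURCE B (Python) =====
-- # The group table collapses to a symmetric synonym relation: since the four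
-- # groups are disjoint, A's answer is exactly "the strings are equal, or they
-- # form one of the 8 unordered same-group synonym pairs".
-- _SYNONYMS = {
--     frozenset(p) for p in [
--         ('int64', 'int32'), ('int64', 'int'), ('int32', 'int'),
--         ('float64', 'float32'), ('float64', 'float'), ('float32', 'float'),
--         ('object', 'string'), ('bool', 'boolean'),
--     ]
-- }
--
-- def _type_matches(expected: str, actual: str) -> bool:
--     """Check if actual type matches expected type"""
--     return expected == actual or frozenset((expected, actual)) in _SYNONYMS
-- ===== Notes on version B (the rewrite author's own statement) =====
-- stated objective: simpler
-- what changed: Replaces the group table and its scan loop by a flat symmetric synonym-pair relation: the answer is 'expected == actual or the unordered pair {expected, actual} is a listed same-group pair', a single membership test with no per-group scan and no group keys at all; correct because the four groups are disjoint, so same-group membership equals being equal or a synonym pair.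
import Mathlib
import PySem

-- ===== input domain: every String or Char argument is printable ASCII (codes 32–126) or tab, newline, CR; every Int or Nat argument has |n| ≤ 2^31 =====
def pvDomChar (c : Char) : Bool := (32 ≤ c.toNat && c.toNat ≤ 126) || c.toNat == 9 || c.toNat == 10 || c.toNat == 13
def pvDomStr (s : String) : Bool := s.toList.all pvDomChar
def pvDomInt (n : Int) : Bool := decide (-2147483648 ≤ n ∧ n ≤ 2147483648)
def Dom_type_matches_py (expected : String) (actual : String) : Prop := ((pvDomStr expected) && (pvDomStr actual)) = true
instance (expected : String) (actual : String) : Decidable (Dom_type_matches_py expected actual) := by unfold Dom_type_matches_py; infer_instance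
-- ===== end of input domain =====

-- B replaces A's group table and scan loop by a flat symmetric synonym-pair relation
-- (equal, or an unordered same-group pair); return value only, no side effects.
-- ===== PORT A =====
-- the dict literal, as an association list in insertion order
def pvTypeMapping : List (String × List String) :=
  [("int64", ["int64", "int32", "int"]),
   ("float64", ["float64", "float32", "float"]),
   ("string", ["object", "string"]),
   ("bool", ["bool", "boolean"])]

-- the 'for expected_type, actual_types in type_mapping.items()' loop with its early return
def pvALoop (expected : String) (actual : String) : List (String × List String) → Bool
  | [] => expected == actual
  | (_, actualTypes) :: rest =>
      if actualTypes.contains expected then actualTypes.contains actual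
      else pvALoop expected actual rest

def type_matches_py (expected : String) (actual : String) : Bool :=
  pvALoop expected actual pvTypeMapping

-- ===== PORT B =====
-- _SYNONYMS: the 8 unordered synonym pairs (each frozenset has exactly two distinct
-- elements, and the listed pairs are pairwise distinct as unordered pairs, so the
-- Python set is exactly this collection).
def pvSynPairs : List (String × String) :=
  [("int64", "int32"), ("int64", "int"), ("int32", "int"),
   ("float64", "float32"), ("float64", "float"), ("float32", "float"),
   ("object", "string"), ("bool", "boolean")]

-- 'frozenset((expected, actual)) in _SYNONYMS' ported exactly as unordered-pair
-- equality against each listed pair (frozenset equality on ≤2-element sets).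
def type_matches_py_alt (expected : String) (actual : String) : Bool :=
  expected == actual ||
    pvSynPairs.any (fun p => (p.1 == expected && p.2 == actual) || (p.1 == actual && p.2 == expected))

-- ===== PRECONDITION & SPEC =====
def Spec_type_matches_py (expected : String) (actual : String) (out : Bool) : Prop := out = type_matches_py_alt expected actual
instance (expected : String) (actual : String) (out : Bool) : Decidable (Spec_type_matches_py expected actual out) := by unfold Spec_type_matches_py; infer_instance

-- ===== CLAIM =====
def Claim_equal_type_matches_py : Prop := ∀ (expected : String) (actual : String), Dom_type_matches_py expected actual → Spec_type_matches_py expected actual (type_matches_py expected actual)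

-- ===== LEMMAS AND PROOFS =====

-- A = B when expected is one of the ten grouped type strings
lemma pvCase1 (a : String) : type_matches_py "int64" a = type_matches_py_alt "int64" a := by
  simp [type_matches_py, pvALoop, pvTypeMapping, type_matches_py_alt, pvSynPairs, eq_comm]
  rw [Bool.eq_iff_iff]
  simp
  tauto

lemma pvCase2 (a : String) : type_matches_py "int32" a = type_matches_py_alt "int32" a := by
  simp [type_matches_py, pvALoop, pvTypeMapping, type_matches_py_alt, pvSynPairs, eq_comm]
  rw [Bool.eq_iff_iff]
  simp
  tauto

lemma pvCase3 (a : String) : type_matches_py "int" a = type_matches_py_alt "int" a := by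
  simp [type_matches_py, pvALoop, pvTypeMapping, type_matches_py_alt, pvSynPairs, eq_comm]
  rw [Bool.eq_iff_iff]
  simp
  tauto

lemma pvCase4 (a : String) : type_matches_py "float64" a = type_matches_py_alt "float64" a := by
  simp [type_matches_py, pvALoop, pvTypeMapping, type_matches_py_alt, pvSynPairs, eq_comm]
  rw [Bool.eq_iff_iff]
  simp
  tauto

lemma pvCase5 (a : String) : type_matches_py "float32" a = type_matches_py_alt "float32" a := by
  simp [type_matches_py, pvALoop, pvTypeMapping, type_matches_py_alt, pvSynPairs, eq_comm]
  rw [Bool.eq_iff_iff]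
  simp
  tauto

lemma pvCase6 (a : String) : type_matches_py "float" a = type_matches_py_alt "float" a := by
  simp [type_matches_py, pvALoop, pvTypeMapping, type_matches_py_alt, pvSynPairs, eq_comm]
  rw [Bool.eq_iff_iff]
  simp
  tauto

lemma pvCase7 (a : String) : type_matches_py "object" a = type_matches_py_alt "object" a := by
  simp [type_matches_py, pvALoop, pvTypeMapping, type_matches_py_alt, pvSynPairs, eq_comm]
  rw [Bool.eq_iff_iff]
  simp
  tauto

lemma pvCase8 (a : String) : type_matches_py "string" a = type_matches_py_alt "string" a := by
  simp [type_matches_py, pvALoop, pvTypeMapping, type_matches_py_alt, pvSynPairs, eq_comm]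
  rw [Bool.eq_iff_iff]
  simp
  tauto

lemma pvCase9 (a : String) : type_matches_py "bool" a = type_matches_py_alt "bool" a := by
  simp [type_matches_py, pvALoop, pvTypeMapping, type_matches_py_alt, pvSynPairs, eq_comm]
  rw [Bool.eq_iff_iff]
  simp
  tauto

lemma pvCase10 (a : String) : type_matches_py "boolean" a = type_matches_py_alt "boolean" a := by
  simp [type_matches_py, pvALoop, pvTypeMapping, type_matches_py_alt, pvSynPairs, eq_comm]
  rw [Bool.eq_iff_iff]
  simp
  tauto

-- ===== VERDICT =====
theorem type_matches_py_spec : Claim_equal_type_matches_py := by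
  intro e a _
  unfold Spec_type_matches_py
  by_cases h1 : e = "int64";   · subst h1; exact pvCase1 a
  by_cases h2 : e = "int32";   · subst h2; exact pvCase2 a
  by_cases h3 : e = "int";     · subst h3; exact pvCase3 a
  by_cases h4 : e = "float64"; · subst h4; exact pvCase4 a
  by_cases h5 : e = "float32"; · subst h5; exact pvCase5 a
  by_cases h6 : e = "float";   · subst h6; exact pvCase6 a
  by_cases h7 : e = "object";  · subst h7; exact pvCase7 a
  by_cases h8 : e = "string";  · subst h8; exact pvCase8 a
  by_cases h9 : e = "bool";    · subst h9; exact pvCase9 a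
  by_cases h10 : e = "boolean"; · subst h10; exact pvCase10 a
  -- e is none of the grouped type strings: both sides are 'e == a'
  simp [type_matches_py, pvALoop, pvTypeMapping, type_matches_py_alt, pvSynPairs,
    h1, h2, h3, h4, h5, h6, h7, h8, h9, h10]
  intro ha
  rcases ha with (⟨h,-⟩|⟨-,h⟩)|(⟨h,-⟩|⟨-,h⟩)|(⟨h,-⟩|⟨-,h⟩)|(⟨h,-⟩|⟨-,h⟩)|(⟨h,-⟩|⟨-,h⟩)|(⟨h,-⟩|⟨-,h⟩)|(⟨h,-⟩|⟨-,h⟩)|(⟨h,-⟩|⟨-,h⟩) <;> simp_all
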